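-- pv_equiv track=rewrite | github.com/reljicd/python-playground | src/challenges/k_steps_num_paths.py | k_steps_num_paths_generalized
-- ===== SOURCE A (Python) =====
-- def k_steps_num_paths_generalized(point_a, point_b, k):
--     min_steps = (point_b[0] - point_a[0]) + (point_b[1] - point_a[1])
--     if k % 2 != min_steps % 2 or k < min_steps:
--         raise Exception()
--     if k == 1:
--         return [[point_a]]
--     steps = []
--     points_to_visit = [(point_a[0] + x, point_a[1] + y)
--                        for x in [-1, 0, 1]
--                        for y in [-1, 0, 1]
--                        if (point_a[0] + x) >= 0
--                        and (point_a[1] + y) >= 0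
--                        and (x + y) < 2
--                        and (point_a[0] + x, point_a[1] + y) != point_a]
--     for point_to_visit in points_to_visit:
--         try:
--             paths = k_steps_num_paths_generalized(point_to_visit, point_b, k - 1)
--         except Exception:
--             continue
--         for path in paths:
--             path.insert(0, point_a)
--             steps.append(path)
--     return steps
-- ===== SOURCE B (Python) =====
-- def k_steps_num_paths_generalized(point_a, point_b, k):
--     def ok(p, r):
--         ms = (point_b[0] - p[0]) + (point_b[1] - p[1])
--         return r % 2 == ms % 2 and r >= ms
--
--     if not ok(point_a, k):
--         raise Exception()
--     if k == 1:
--         return [[point_a]]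
--     frontier = [[point_a]]
--     r = k
--     while r > 1 and frontier:
--         new_frontier = []
--         for path in frontier:
--             px, py = path[-1]
--             for x in (-1, 0, 1):
--                 for y in (-1, 0, 1):
--                     q = (px + x, py + y)
--                     if (q[0] >= 0 and q[1] >= 0 and x + y < 2
--                             and q != (px, py) and ok(q, r - 1)):
--                         new_frontier.append(path + [q])
--         frontier = new_frontier
--         r -= 1
--     return frontier
-- ===== Notes on version B (the rewrite author's own statement) =====
-- stated objective: alternative
-- what changed: Replaced the exception-driven recursion (recurse on each unfiltered neighbour, catch the guard Exception, prepend point_a to each returned path) by an iterative level-by-level frontier expansion that checks the reachability guard before extending a path and builds every path front-to-back, so no exceptions and no insert(0) are used after the single top-level guard.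
-- outside the precondition, e.g. on k_steps_num_paths_generalized((-3, 5), (0, 0), 0): A returns [], B returns [[(-3, 5)]]
import Mathlib
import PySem

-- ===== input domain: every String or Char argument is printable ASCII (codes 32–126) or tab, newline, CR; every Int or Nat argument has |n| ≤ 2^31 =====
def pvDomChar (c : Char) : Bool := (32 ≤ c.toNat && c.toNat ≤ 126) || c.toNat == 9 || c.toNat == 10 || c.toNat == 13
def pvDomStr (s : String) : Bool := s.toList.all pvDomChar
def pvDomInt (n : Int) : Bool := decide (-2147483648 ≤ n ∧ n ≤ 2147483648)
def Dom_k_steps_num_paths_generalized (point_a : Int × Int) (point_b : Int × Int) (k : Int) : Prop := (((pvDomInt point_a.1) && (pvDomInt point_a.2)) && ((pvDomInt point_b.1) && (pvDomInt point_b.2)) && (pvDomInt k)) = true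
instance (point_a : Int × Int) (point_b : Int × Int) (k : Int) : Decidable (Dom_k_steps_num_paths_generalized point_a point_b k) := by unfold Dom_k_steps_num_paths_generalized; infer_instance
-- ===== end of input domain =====

-- B replaces A's exception-driven recursion by an iterative level-by-level frontier expansion
-- (guard checked before extending, paths built front-to-back): an alternative decomposition, not claimed faster.


-- ===== PORT A =====
-- min_steps of A / ms of B's ok
def pvMs (p b : Int × Int) : Int := (b.1 - p.1) + (b.2 - p.2)

-- A's points_to_visit comprehension, literally (x outer, y inner, same four conditions)
def pvNeighborsA (a : Int × Int) : List (Int × Int) :=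
  ([-1, 0, 1] : List Int).flatMap (fun x =>
    ([-1, 0, 1] : List Int).filterMap (fun y =>
      if a.1 + x ≥ 0 ∧ a.2 + y ≥ 0 ∧ x + y < 2 ∧ (a.1 + x, a.2 + y) ≠ a
      then some (a.1 + x, a.2 + y) else none))

-- A's recursion; `none` models a raised Exception (the `try/except: continue` skips it).
-- Fuel only makes the Int recursion total in Lean: inside Pre_ the depth is k-1 < k.toNat, so fuel never runs out.
def pvARec (b : Int × Int) : Nat → (Int × Int) → Int → Option (List (List (Int × Int)))
  | 0, _, _ => none
  | fuel + 1, a, k =>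
    let ms := pvMs a b
    if k % 2 ≠ ms % 2 ∨ k < ms then none
    else if k = 1 then some [[a]]
    else
      some ((pvNeighborsA a).foldl (fun steps p =>
        match pvARec b fuel p (k - 1) with
        | none => steps
        | some paths => steps ++ paths.map (fun path => a :: path)) [])

def k_steps_num_paths_generalized (point_a : Int × Int) (point_b : Int × Int) (k : Int) : List (List (Int × Int)) :=
  (pvARec point_b k.toNat point_a k).getD []   -- the top-level raise is outside Pre_

-- ===== PORT B =====
-- B's ok(p, r): r % 2 == ms % 2 and r >= ms
def pvOk (b : Int × Int) (p : Int × Int) (r : Int) : Bool :=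
  (r % 2 == pvMs p b % 2) && decide (pvMs p b ≤ r)

-- B's inner double loop over one frontier path (path[-1] = pyGet? path (-1); never none on a real frontier)
def pvExpand (b : Int × Int) (r : Int) (path : List (Int × Int)) : List (List (Int × Int)) :=
  match PySem.List.pyGet? path (-1) with
  | none => []
  | some (px, py) =>
    ([-1, 0, 1] : List Int).flatMap (fun x =>
      ([-1, 0, 1] : List Int).filterMap (fun y =>
        if px + x ≥ 0 ∧ py + y ≥ 0 ∧ x + y < 2 ∧ (px + x, py + y) ≠ (px, py) ∧ pvOk b (px + x, py + y) (r - 1) = true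
        then some (path ++ [(px + x, py + y)]) else none))

-- B's `while r > 1 and frontier` loop: at most (k-1).toNat iterations, r carried down from k
def pvBLoop (b : Int × Int) : Nat → Int → List (List (Int × Int)) → List (List (Int × Int))
  | 0, _, frontier => frontier
  | n + 1, r, frontier =>
    if frontier.isEmpty then frontier
    else pvBLoop b n (r - 1) (frontier.flatMap (pvExpand b r))

def k_steps_num_paths_generalized_alt (point_a : Int × Int) (point_b : Int × Int) (k : Int) : List (List (Int × Int)) :=
  if pvOk point_b point_a k ≠ true then []   -- B raises here, like A; outside Pre_
  else if k = 1 then [[point_a]]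
  else pvBLoop point_b (k - 1).toNat k [[point_a]]

-- ===== PRECONDITION & SPEC =====
-- Pre_ excludes (a) guard-fail inputs, where A raises Exception, and (b) k ≤ 0 with the guard passing,
-- where A either recurses unboundedly behind caught RecursionErrors (its result depends on the recursion
-- limit) or returns an accidental [] when point_a has no admissible neighbour.
def Pre_k_steps_num_paths_generalized (point_a : Int × Int) (point_b : Int × Int) (k : Int) : Prop :=
  1 ≤ k ∧ k % 2 = pvMs point_a point_b % 2 ∧ pvMs point_a point_b ≤ k
instance (point_a : Int × Int) (point_b : Int × Int) (k : Int) : Decidable (Pre_k_steps_num_paths_generalized point_a point_b k) := by unfold Pre_k_steps_num_paths_generalized; infer_instance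
def pvWitness_k_steps_num_paths_generalized : (Int × Int) × (Int × Int) × Int := ((0, 0), (1, 1), 2)

def Spec_k_steps_num_paths_generalized (point_a : Int × Int) (point_b : Int × Int) (k : Int) (out : List (List (Int × Int))) : Prop := out = k_steps_num_paths_generalized_alt point_a point_b k
instance (point_a : Int × Int) (point_b : Int × Int) (k : Int) (out : List (List (Int × Int))) : Decidable (Spec_k_steps_num_paths_generalized point_a point_b k out) := by unfold Spec_k_steps_num_paths_generalized; infer_instance

-- ===== CLAIM (what is proved, stated in full; the proofs are below) =====
def Claim_equal_k_steps_num_paths_generalized : Prop := ∀ (point_a : Int × Int) (point_b : Int × Int) (k : Int), Dom_k_steps_num_paths_generalized point_a point_b k → Pre_k_steps_num_paths_generalized point_a point_b k → Spec_k_steps_num_paths_generalized point_a point_b k (k_steps_num_paths_generalized point_a point_b k)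

-- ===== LEMMAS AND PROOFS =====

-- the common DFS tree of full paths of n+1 points starting at p
def pvF (b : Int × Int) : Nat → (Int × Int) → List (List (Int × Int))
  | 0, p => [[p]]
  | n + 1, p =>
    ((pvNeighborsA p).filter (fun q => pvOk b q ((n : Int) + 1))).flatMap
      (fun q => (pvF b n q).map (p :: ·))

theorem pv_filter_flatMap {α β : Type} (l : List α) (c : α → Bool) (h : α → List β) :
    (l.filter c).flatMap h = l.flatMap (fun q => if c q then h q else []) := by
  induction l with
  | nil => simp
  | cons x xs ih =>
    by_cases hx : c x = true <;> simp [hx, ih]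

theorem pv_fm_if {α β γ : Type} (l : List α) (C : α → Prop) [DecidablePred C]
    (g : α → β) (D : β → Bool) (f : β → γ) :
    l.filterMap (fun y => if C y ∧ D (g y) = true then some (f (g y)) else none)
      = ((l.filterMap (fun y => if C y then some (g y) else none)).filter D).map f := by
  induction l with
  | nil => simp
  | cons x xs ih =>
    by_cases hC : C x
    · by_cases hD : D (g x) = true <;>
        simp [hC, hD, ih]
    · simp [hC, ih]

theorem pvARec_eq (b : Int × Int) (n : Nat) :
    ∀ (fuel : Nat) (a : Int × Int) (k : Int), k = (n : Int) + 1 → n + 1 ≤ fuel →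
      pvARec b fuel a k = if pvOk b a k then some (pvF b n a) else none := by
  induction n with
  | zero =>
    intro fuel a k hk hfuel
    obtain ⟨m, rfl⟩ : ∃ m, fuel = m + 1 := ⟨fuel - 1, by omega⟩
    have hk1 : k = 1 := by omega
    simp only [pvARec, pvF, pvOk, Bool.and_eq_true, beq_iff_eq, decide_eq_true_eq]
    split_ifs <;> first | rfl | omega
  | succ n ih =>
    intro fuel a k hk hfuel
    obtain ⟨m, rfl⟩ : ∃ m, fuel = m + 1 := ⟨fuel - 1, by omega⟩
    by_cases hok : pvOk b a k = true
    · have h1 : ¬ (k % 2 ≠ pvMs a b % 2 ∨ k < pvMs a b) := by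
        simp only [pvOk, Bool.and_eq_true, beq_iff_eq, decide_eq_true_eq] at hok; omega
      have hk1 : k ≠ 1 := by omega
      have hrec : ∀ p, pvARec b m p (k - 1) = if pvOk b p (k - 1) then some (pvF b n p) else none := by
        intro p; exact ih m p (k - 1) (by omega) (by omega)
      have hkn : k - 1 = (n : Int) + 1 := by omega
      simp only [pvARec]
      rw [if_neg h1, if_neg hk1, if_pos hok]
      congr 1
      have hfold : ((pvNeighborsA a).foldl (fun steps p =>
            match pvARec b m p (k - 1) with
            | none => steps
            | some paths => steps ++ paths.map (fun path => a :: path)) [])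
          = (pvNeighborsA a).foldl (fun steps p =>
                steps ++ (if pvOk b p (k - 1) then (pvF b n p).map (fun path => a :: path) else [])) [] := by
        refine List.foldl_ext _ _ _ (fun acc' p _ => ?_)
        rw [hrec p]
        by_cases hp : pvOk b p (k - 1) = true <;> simp [hp]
      rw [hfold, PySem.List.foldl_append_eq_flatMap]
      simp only [List.nil_append, pvF, hkn]
      rw [pv_filter_flatMap]
    · have h1 : (k % 2 ≠ pvMs a b % 2 ∨ k < pvMs a b) := by
        simp only [pvOk, Bool.and_eq_true, beq_iff_eq, decide_eq_true_eq] at hok; omega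
      simp [pvARec, h1, hok]

theorem pvBLoop_nil (b : Int × Int) (n : Nat) : ∀ r, pvBLoop b n r [] = [] := by
  cases n <;> intro r <;> simp [pvBLoop]

theorem pvBLoop_append (b : Int × Int) (n : Nat) :
    ∀ (r : Int) (l1 l2 : List (List (Int × Int))),
      pvBLoop b n r (l1 ++ l2) = pvBLoop b n r l1 ++ pvBLoop b n r l2 := by
  induction n with
  | zero => intro r l1 l2; simp [pvBLoop]
  | succ n ih =>
    intro r l1 l2
    match l1, l2 with
    | [], l2 => simp [pvBLoop_nil]
    | l1, [] => simp [pvBLoop_nil]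
    | x :: l1, y :: l2 =>
      show pvBLoop b n (r - 1) _ = pvBLoop b n (r - 1) _ ++ pvBLoop b n (r - 1) _
      rw [List.flatMap_append, ih]

theorem pvBLoop_map (b : Int × Int) (n : Nat) (r : Int) {α : Type}
    (qs : List α) (g : α → List (Int × Int)) :
    pvBLoop b n r (qs.map g) = qs.flatMap (fun q => pvBLoop b n r [g q]) := by
  induction qs with
  | nil => simp [pvBLoop_nil]
  | cons q qs ih =>
    have : (q :: qs).map g = [g q] ++ qs.map g := by simp
    rw [this, pvBLoop_append, ih]; simp

theorem pvExpand_eq (b : Int × Int) (r : Int) (pref : List (Int × Int)) (p : Int × Int) :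
    pvExpand b r (pref ++ [p])
      = (((pvNeighborsA p).filter (fun q => pvOk b q (r - 1))).map (fun q => (pref ++ [p]) ++ [q])) := by
  obtain ⟨px, py⟩ := p
  unfold pvExpand
  rw [PySem.List.pyGet?_neg_one_append_singleton]
  have hinner : ∀ x : Int,
      (([-1, 0, 1] : List Int).filterMap (fun y =>
        if px + x ≥ 0 ∧ py + y ≥ 0 ∧ x + y < 2 ∧ (px + x, py + y) ≠ (px, py) ∧ pvOk b (px + x, py + y) (r - 1) = true
        then some ((pref ++ [(px, py)]) ++ [(px + x, py + y)]) else none))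
      = ((([-1, 0, 1] : List Int).filterMap (fun y =>
          if px + x ≥ 0 ∧ py + y ≥ 0 ∧ x + y < 2 ∧ (px + x, py + y) ≠ (px, py)
          then some (px + x, py + y) else none)).filter (fun q => pvOk b q (r - 1))).map
            (fun q => (pref ++ [(px, py)]) ++ [q]) := by
    intro x
    have := pv_fm_if ([-1, 0, 1] : List Int)
      (fun y => px + x ≥ 0 ∧ py + y ≥ 0 ∧ x + y < 2 ∧ (px + x, py + y) ≠ (px, py))
      (fun y => (px + x, py + y)) (fun q => pvOk b q (r - 1))
      (fun q => (pref ++ [(px, py)]) ++ [q])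
    simpa [and_assoc] using this
  show ([-1, 0, 1] : List Int).flatMap _ = _
  rw [List.flatMap_congr (fun x _ => hinner x)]
  simp only [pvNeighborsA, List.filter_flatMap, List.map_flatMap]

theorem pvBLoop_path (b : Int × Int) (n : Nat) :
    ∀ (r : Int) (pref : List (Int × Int)) (p : Int × Int), r = (n : Int) + 1 →
      pvBLoop b n r [pref ++ [p]] = (pvF b n p).map (fun t => pref ++ t) := by
  induction n with
  | zero => intro r pref p hr; simp [pvBLoop, pvF]
  | succ n ih =>
    intro r pref p hr
    show (if ([pref ++ [p]] : List (List (Int × Int))).isEmpty then _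
          else pvBLoop b n (r - 1) ([pref ++ [p]].flatMap (pvExpand b r))) = _
    rw [if_neg (by simp)]
    have hr1 : r - 1 = (n : Int) + 1 := by push_cast at hr ⊢; omega
    rw [List.flatMap_singleton, pvExpand_eq, pvBLoop_map]
    have hq : ∀ q ∈ (pvNeighborsA p).filter (fun q => pvOk b q (r - 1)),
        pvBLoop b n (r - 1) [(pref ++ [p]) ++ [q]] = (pvF b n q).map (fun t => (pref ++ [p]) ++ t) :=
      fun q _ => ih (r - 1) (pref ++ [p]) q hr1
    rw [List.flatMap_congr hq]
    simp only [pvF, hr1, List.map_flatMap, List.map_map]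
    refine List.flatMap_congr (fun q _ => ?_)
    refine List.map_congr_left (fun t _ => ?_)
    simp

-- ===== VERDICT (by name: the statement is the Claim_ definition above) =====
theorem k_steps_num_paths_generalized_spec : Claim_equal_k_steps_num_paths_generalized := by
  intro a b k _ hPre
  obtain ⟨hk1, hpar, hms⟩ := hPre
  have hok : pvOk b a k = true := by
    simp only [pvOk, Bool.and_eq_true, beq_iff_eq, decide_eq_true_eq]; exact ⟨hpar, hms⟩
  set n : Nat := (k - 1).toNat with hn
  have hkn : k = (n : Int) + 1 := by omega
  show k_steps_num_paths_generalized a b k = k_steps_num_paths_generalized_alt a b k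
  have hA : k_steps_num_paths_generalized a b k = pvF b n a := by
    unfold k_steps_num_paths_generalized
    rw [pvARec_eq b n k.toNat a k hkn (by omega), if_pos hok]
    rfl
  by_cases hk : k = 1
  · have hn0 : n = 0 := by omega
    unfold k_steps_num_paths_generalized_alt
    rw [hA, hn0, hk]
    rw [hk] at hok
    simp [hok, pvF]
  · unfold k_steps_num_paths_generalized_alt
    rw [hA, if_neg (by simp [hok]), if_neg hk]
    have : ([[a]] : List (List (Int × Int))) = [([] : List (Int × Int)) ++ [a]] := by simp
    rw [this, pvBLoop_path b n k [] a hkn]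
    simp
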